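-- pv_equiv track=rewrite | github.com/JeongEunJi1127/Algorithm | Python/72410.py | solution
-- ===== SOURCE A (Python) =====
-- def solution(new_id):
--     answer = ''
--     character = '~!@#$%^&*()=+[{]}:?,<>/'
--
--     # [1] .lower() : 대문자를 소문자로 바꾸어 주는 메소드
--     # [2] string.join() 메소드는 괄호 안의 요소를 string과 결합하여 새 문자열을 반환해줌
--     new_id = "".join(x for x in new_id.lower() if x not in character)
--
--     # [3] 마침표(.)가 2번 이상 연속된 부분을 하나의 마침표(.)로 치환
--     for el in range(len(new_id)):
--         if el == 0:
--             answer += new_id[el]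
--         elif (new_id[el] == new_id[el-1]) and (new_id[el] == "."):
--             answer
--         else:
--             answer += new_id[el]
--
--     # [4] index 메서드를 통해 마침표 위치 알아내서 제거
--     # strip 메소드를 몰랐을 때의 내 답 => 여기서 런타임 에러 발생
--     # if answer.index(".") == 0 :
--     #     answer = answer[1:]
--     # if (answer != "") and (answer[::-1].index(".") == 0) :
--     #     answer = answer[:len(answer)-1]
--
--     # strip 메소드 사용하면!
--     answer = answer.strip(".")
--
--     # [5] 빈 문자열이라면, new_id에 "a"를 대입합니다.
--     if answer == "" :
--         answer= "a"
--
--     # [6] 길이가 16자 이상이면, 첫 15개의 문자를 제외한 나머지 문자들을 모두 제거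
--     if len(answer) >= 16 :
--         answer = answer[:15]
--         if answer[14] == ".":
--             answer = answer[:14]
--
--     # [7] 길이가 2자 이하라면, 마지막 문자를 answer의 길이가 3이 될 때까지 반복해서 끝에 붙입니다.
--     while len(answer) <= 2:
--         answer += answer[-1]
--
--     return answer
-- ===== SOURCE B (Python) =====
-- def solution(new_id):
--     bad = '~!@#$%^&*()=+[{]}:?,<>/'
--     s = ''.join(c for c in new_id.lower() if c not in bad)
--     core = '.'.join(p for p in s.split('.') if p) or 'a'
--     head = core[:15].rstrip('.')
--     return head.ljust(3, head[-1])
-- ===== Notes on version B (the rewrite author's own statement) =====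
-- stated objective: simpler
-- what changed: Replaces the per-character index loop that collapses consecutive dots plus the separate strip call with a single split/filter/join step, and replaces the guarded truncation branch and the while-padding loop with an unconditional 15-slice, rstrip of trailing dots, and ljust padding.
import Mathlib
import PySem

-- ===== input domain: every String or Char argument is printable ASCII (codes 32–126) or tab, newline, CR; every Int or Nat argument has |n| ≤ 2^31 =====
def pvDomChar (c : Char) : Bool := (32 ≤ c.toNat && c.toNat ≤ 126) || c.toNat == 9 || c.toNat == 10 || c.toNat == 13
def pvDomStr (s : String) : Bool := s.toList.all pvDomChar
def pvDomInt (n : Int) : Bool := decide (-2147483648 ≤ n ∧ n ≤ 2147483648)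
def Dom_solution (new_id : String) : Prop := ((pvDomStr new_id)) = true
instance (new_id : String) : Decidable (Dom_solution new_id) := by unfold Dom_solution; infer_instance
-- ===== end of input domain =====

-- B replaces A's index loop for dot-collapsing plus strip('.') by a split('.')/filter/join step,
-- and A's guarded truncation and while-padding loop by [:15].rstrip('.') and ljust. Objective: simpler.

-- ===== PORT A =====
-- the while-loop of step [7]: 'while len(answer) <= 2: answer += answer[-1]'
-- (pyGetD's default is a totality guard only: in solution the loop always runs on nonempty answer)
def pvPadA (answer : List Char) : List Char :=
  if answer.length ≤ 2 then pvPadA (answer ++ [PySem.List.pyGetD answer (-1) ' ']) else answer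
termination_by 3 - answer.length
decreasing_by simp; omega

def solution (new_id : String) : String :=
  let character : List Char := "~!@#$%^&*()=+[{]}:?,<>/".toList
  let nid : List Char := (PySem.Chars.lower new_id.toList).filter (fun x => !character.contains x)
  let answer : List Char :=
    (PySem.List.pyRange 0 (nid.length : Int) 1).foldl (fun answer el =>
      if el = 0 then answer ++ [PySem.List.pyGetD nid el ' ']
      else if PySem.List.pyGetD nid el ' ' = PySem.List.pyGetD nid (el - 1) ' ' ∧
              PySem.List.pyGetD nid el ' ' = '.' then answer
      else answer ++ [PySem.List.pyGetD nid el ' ']) []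
  let answer := PySem.Chars.stripChars answer ['.']
  let answer := if answer = [] then ['a'] else answer
  let answer :=
    if 16 ≤ answer.length then
      let a := PySem.List.slice answer none (some 15)
      if PySem.List.pyGetD a 14 ' ' = '.' then PySem.List.slice a none (some 14) else a
    else answer
  String.mk (pvPadA answer)

-- ===== PORT B =====
-- core[:15].rstrip('.') : str.rstrip with an explicit char argument is ported by hand (exact:
-- it drops the trailing run of '.' characters); PySem has no rstrip-with-chars primitive.
def pvRstripDots (l : List Char) : List Char :=
  (l.reverse.dropWhile (fun c => c = '.')).reverse

def solution_alt (new_id : String) : String :=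
  let bad : List Char := "~!@#$%^&*()=+[{]}:?,<>/".toList
  let s : List Char := (PySem.Chars.lower new_id.toList).filter (fun c => !bad.contains c)
  let core0 : List Char := PySem.Chars.join ['.'] ((PySem.Chars.splitOn s ['.']).filter (fun p => !p.isEmpty))
  let core : List Char := if core0.isEmpty then ['a'] else core0
  let head : List Char := pvRstripDots (PySem.List.slice core none (some 15))
  String.mk (head ++ List.replicate (3 - head.length) (PySem.List.pyGetD head (-1) ' '))

-- ===== PRECONDITION & SPEC =====
def Spec_solution (new_id : String) (out : String) : Prop := out = solution_alt new_id
instance (new_id : String) (out : String) : Decidable (Spec_solution new_id out) := by unfold Spec_solution; infer_instance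

-- ===== CLAIM (what is proved, stated in full; the proofs are below) =====
def Claim_equal_solution : Prop := ∀ (new_id : String), Dom_solution new_id → Spec_solution new_id (solution new_id)

-- ===== LEMMAS AND PROOFS =====

-- A's dot-collapse loop as structural recursion: pvGo2 b l, b = "previous char was '.'".
def pvGo2 : Bool → List Char → List Char
  | _, [] => []
  | b, c :: r => (if c = '.' ∧ b then [] else [c]) ++ pvGo2 (c == '.') r

def pvCollab : List Char → List Char
  | [] => []
  | c :: r => c :: pvGo2 (c == '.') r

-- canonical form both sides reach: pvCanon2 false l = the nonempty dot-separated words of l,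
-- joined by single dots (false = "skipping separators", true = "inside a word")
def pvCanon2 : Bool → List Char → List Char
  | _, [] => []
  | false, c :: r => if c = '.' then pvCanon2 false r else c :: pvCanon2 true r
  | true, c :: r => if c = '.' then (if pvCanon2 false r = [] then [] else '.' :: pvCanon2 false r)
                    else c :: pvCanon2 true r

-- s.split('.') as structural recursion: (first part, remaining parts)
def pvSSplit : List Char → List Char × List (List Char)
  | [] => ([], [])
  | c :: r => if c = '.' then ([], (pvSSplit r).1 :: (pvSSplit r).2)
              else (c :: (pvSSplit r).1, (pvSSplit r).2)

theorem pvSplitOn_go_eq (fuel : Nat) (l cur : List Char) (acc : List (List Char))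
    (h : l.length ≤ fuel) :
    PySem.Chars.splitOn.go ['.'] fuel l cur acc =
      acc.reverse ++ (cur.reverse ++ (pvSSplit l).1) :: (pvSSplit l).2 := by
  induction fuel generalizing l cur acc with
  | zero =>
    have : l = [] := by cases l <;> simp_all
    subst this
    rw [PySem.Chars.splitOn.go.eq_def]
    simp [pvSSplit]
  | succ fuel ih =>
    rw [PySem.Chars.splitOn.go.eq_def]
    cases l with
    | nil => simp [pvSSplit]
    | cons c rest =>
      simp only [List.isPrefixOf]
      by_cases hc : c = '.'
      · subst hc
        rw [if_pos (by simp)]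
        rw [ih _ _ _ (by simpa using Nat.le_of_succ_le_succ h)]
        simp [pvSSplit]
      · rw [if_neg (by simp; exact fun h => hc h.symm)]
        rw [ih _ _ _ (by simpa using Nat.le_of_succ_le_succ h)]
        simp [pvSSplit, hc]

theorem pvSplitOn_eq (l : List Char) :
    PySem.Chars.splitOn l ['.'] = (pvSSplit l).1 :: (pvSSplit l).2 := by
  unfold PySem.Chars.splitOn
  rw [pvSplitOn_go_eq _ _ _ _ (by omega)]
  simp

theorem pvIntercalate_ne_nil (P : List (List Char)) (h : ∀ p ∈ P, p ≠ []) (hP : P ≠ []) :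
    List.intercalate ['.'] P ≠ [] := by
  cases P with
  | nil => simp at hP
  | cons p ps =>
    cases ps with
    | nil => simpa [List.intercalate] using h p (by simp)
    | cons q qs =>
      have hp := h p (by simp)
      simp [List.intercalate, List.intersperse, hp]

theorem pvIntercalate_cons₂ (p q : List Char) (t : List (List Char)) :
    List.intercalate ['.'] (p :: q :: t) = p ++ '.' :: List.intercalate ['.'] (q :: t) := by
  simp [List.intercalate, List.intersperse]

-- join('.') of the nonempty split parts = pvCanon2 (joint statement for the two recursion states)
theorem pvJoin_both (l : List Char) :
    (List.intercalate ['.'] (((pvSSplit l).1 :: (pvSSplit l).2).filter (fun p => !p.isEmpty))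
        = pvCanon2 false l)
    ∧ ((pvSSplit l).1 ++
        (if ((pvSSplit l).2.filter (fun p => !p.isEmpty)) = [] then []
         else '.' :: List.intercalate ['.'] ((pvSSplit l).2.filter (fun p => !p.isEmpty)))
        = pvCanon2 true l) := by
  induction l with
  | nil => simp [pvSSplit, pvCanon2, List.intercalate]
  | cons c r ih =>
    obtain ⟨ihA, ihW⟩ := ih
    by_cases hc : c = '.'
    · subst hc
      constructor
      · simpa [pvSSplit, pvCanon2] using ihA
      · simp only [pvSSplit, pvCanon2, reduceIte]
        rw [← ihA]
        have hiff : ((((pvSSplit r).1 :: (pvSSplit r).2).filter (fun p => !p.isEmpty)) = []) ↔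
            (List.intercalate ['.'] (((pvSSplit r).1 :: (pvSSplit r).2).filter (fun p => !p.isEmpty)) = []) := by
          constructor
          · intro h; rw [h]; simp [List.intercalate]
          · intro h
            rcases hF : (((pvSSplit r).1 :: (pvSSplit r).2).filter (fun p => !p.isEmpty)) with _ | ⟨p, ps⟩
            · exact hF
            · exfalso
              rw [hF] at h
              apply pvIntercalate_ne_nil (p :: ps) ?_ (by simp) h
              intro q hq
              have : q ∈ (((pvSSplit r).1 :: (pvSSplit r).2).filter (fun p => !p.isEmpty)) := by
                rw [hF]; exact hq
              simpa using (List.of_mem_filter this)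
        exact if_congr hiff rfl rfl
    · constructor
      · simp only [pvSSplit, if_neg hc, pvCanon2]
        rcases hF : ((pvSSplit r).2.filter (fun p => !p.isEmpty)) with _ | ⟨q, qs⟩
        · simp only [List.filter_cons]
          simp [hF] at ihW ⊢
          rw [← ihW]
          simp [List.intercalate]
        · simp only [List.filter_cons]
          simp [hF] at ihW ⊢
          rw [← ihW, pvIntercalate_cons₂]
          simp
      · simp only [pvSSplit, if_neg hc, pvCanon2]
        rcases hF : ((pvSSplit r).2.filter (fun p => !p.isEmpty)) with _ | ⟨q, qs⟩
        · simp [hF] at ihW ⊢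
          rw [← ihW]
        · simp [hF] at ihW ⊢
          rw [← ihW]

theorem pvRstrip_cons_ne (c : Char) (hc : c ≠ '.') (x : List Char) :
    pvRstripDots (c :: x) = c :: pvRstripDots x := by
  unfold pvRstripDots
  rw [List.reverse_cons, List.dropWhile_append]
  by_cases he : (List.dropWhile (fun c => c = '.') x.reverse).isEmpty
  · rw [if_pos he]
    simp only [List.isEmpty_iff] at he
    simp [hc, he]
  · rw [if_neg he]
    simp

theorem pvRstrip_cons_dot (x : List Char) :
    pvRstripDots ('.' :: x) = if pvRstripDots x = [] then [] else '.' :: pvRstripDots x := by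
  unfold pvRstripDots
  rw [List.reverse_cons, List.dropWhile_append]
  by_cases he : (List.dropWhile (fun c => c = '.') x.reverse).isEmpty
  · rw [if_pos he]
    simp only [List.isEmpty_iff] at he
    simp [he]
  · rw [if_neg he]
    simp only [List.isEmpty_iff] at he
    simp [he]

theorem pvRstrip_go2 (l : List Char) (b : Bool) :
    pvRstripDots (pvGo2 b l) = pvCanon2 (!b) l := by
  induction l generalizing b with
  | nil => simp [pvGo2, pvCanon2, pvRstripDots]
  | cons c r ih =>
    by_cases hc : c = '.'
    · subst hc
      cases b with
      | true =>
        simp only [pvGo2, Bool.not_true, show ('.' == '.') = true from rfl, and_self, if_pos trivial]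
        simp only [List.nil_append]
        rw [ih true]
        simp [pvCanon2]
      | false =>
        simp only [pvGo2, Bool.not_false]
        rw [if_neg (by simp)]
        rw [show ('.' == '.') = true from rfl]
        simp only [List.cons_append, List.nil_append]
        rw [pvRstrip_cons_dot, ih true]
        simp [pvCanon2]
    · have hbeq : (c == '.') = false := by simp [hc]
      simp only [pvGo2, hbeq]
      rw [if_neg (by simp [hc])]
      simp only [List.cons_append, List.nil_append]
      rw [pvRstrip_cons_ne c hc, ih false]
      cases b <;> simp [pvCanon2, hc]

-- pvGo2 true never starts with a dot
theorem pvGo2_true_head (r : List Char) :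
    List.dropWhile (fun c => c = '.') (pvGo2 true r) = pvGo2 true r := by
  induction r with
  | nil => simp [pvGo2]
  | cons c r ih =>
    by_cases hc : c = '.'
    · subst hc
      simpa [pvGo2] using ih
    · have hbeq : (c == '.') = false := by simp [hc]
      simp [pvGo2, hbeq, hc, List.dropWhile_cons]

theorem pvStrip_collab (l : List Char) :
    PySem.Chars.stripChars (pvCollab l) ['.'] = pvCanon2 false l := by
  cases l with
  | nil => simp [pvCollab, pvCanon2, PySem.Chars.stripChars]
  | cons c r =>
    have hstrip : ∀ y : List Char, PySem.Chars.stripChars y ['.'] =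
        pvRstripDots (List.dropWhile (fun c => c = '.') y) := by
      intro y
      have hp : (fun c => List.contains ['.'] c) = (fun c : Char => decide (c = '.')) := by
        funext c; simp
      show (List.dropWhile (fun c => List.contains ['.'] c)
        (List.dropWhile (fun c => List.contains ['.'] c) y).reverse).reverse = _
      rw [hp]
      rfl
    rw [hstrip]
    by_cases hc : c = '.'
    · subst hc
      simp only [pvCollab, show ('.' == '.') = true from rfl]
      rw [List.dropWhile_cons]
      simp only [decide_true, if_true]
      rw [pvGo2_true_head, pvRstrip_go2]
      simp [pvCanon2]
    · have hbeq : (c == '.') = false := by simp [hc]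
      simp only [pvCollab, hbeq]
      rw [List.dropWhile_cons]
      rw [if_neg (by simp [hc])]
      rw [pvRstrip_cons_ne c hc, pvRstrip_go2]
      simp [pvCanon2, hc]

theorem pvGetD_last (l : List Char) (h : l ≠ []) (d : Char) :
    l.getD (l.length - 1) d = l.getLastD d := by
  rw [List.getD_eq_getElem?_getD, List.getLastD_eq_getLast?, List.getLast?_eq_getElem?]

theorem pvLastDotIff (a c : Char) (r : List Char) :
    (c = '.' ∧ r.getLastD (if (a == '.') = true then '.' else ' ') = '.') ↔
      (c = '.' ∧ r.getLastD a = '.') := by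
  cases r with
  | nil => by_cases ha : a = '.' <;> simp [ha]
  | cons x xs => rw [List.getLastD_cons, List.getLastD_cons]

theorem pvGo2_snoc (r : List Char) (c : Char) (b : Bool) :
    pvGo2 b (r ++ [c]) =
      pvGo2 b r ++ (if c = '.' ∧ r.getLastD (if b then '.' else ' ') = '.' then [] else [c]) := by
  induction r generalizing b with
  | nil =>
    cases b <;> simp [pvGo2] <;> by_cases hc : c = '.' <;> simp [hc, pvGo2]
  | cons a r ih =>
    simp only [List.cons_append, pvGo2, ih (a == '.'), List.append_assoc, List.getLastD_cons]
    rw [if_congr (pvLastDotIff a c r) rfl rfl]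

theorem pvCollab_snoc (l : List Char) (hl : l ≠ []) (c : Char) :
    pvCollab (l ++ [c]) =
      if c = '.' ∧ l.getLastD ' ' = '.' then pvCollab l else pvCollab l ++ [c] := by
  cases l with
  | nil => simp at hl
  | cons a r =>
    simp only [List.cons_append, pvCollab, pvGo2_snoc, List.getLastD_cons]
    rw [if_congr (pvLastDotIff a c r) rfl rfl]
    split_ifs <;> simp

theorem pvFold_eq_collab (l : List Char) :
    (PySem.List.pyRange 0 (l.length : Int) 1).foldl (fun answer el =>
      if el = 0 then answer ++ [PySem.List.pyGetD l el ' ']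
      else if PySem.List.pyGetD l el ' ' = PySem.List.pyGetD l (el - 1) ' ' ∧
              PySem.List.pyGetD l el ' ' = '.' then answer
      else answer ++ [PySem.List.pyGetD l el ' ']) []
      = pvCollab l := by
  induction l using List.reverseRecOn with
  | nil => simp [pvCollab, PySem.List.pyRange_zero_nat]
  | append_singleton l c ih =>
    have hlen : ((l ++ [c]).length : Int) = (l.length : Int) + 1 := by simp
    rw [hlen, PySem.List.pyRange_one_succ_right (by positivity), List.foldl_append]
    have hcongr : ∀ (acc : List Char), ∀ el ∈ PySem.List.pyRange 0 (l.length : Int) 1,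
        (fun answer el =>
          if el = 0 then answer ++ [PySem.List.pyGetD (l ++ [c]) el ' ']
          else if PySem.List.pyGetD (l ++ [c]) el ' ' = PySem.List.pyGetD (l ++ [c]) (el - 1) ' ' ∧
                  PySem.List.pyGetD (l ++ [c]) el ' ' = '.' then answer
          else answer ++ [PySem.List.pyGetD (l ++ [c]) el ' ']) acc el =
        (fun answer el =>
          if el = 0 then answer ++ [PySem.List.pyGetD l el ' ']
          else if PySem.List.pyGetD l el ' ' = PySem.List.pyGetD l (el - 1) ' ' ∧
                  PySem.List.pyGetD l el ' ' = '.' then answer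
          else answer ++ [PySem.List.pyGetD l el ' ']) acc el := by
      intro acc el hel
      rw [PySem.List.mem_pyRange_one] at hel
      obtain ⟨h0, hn⟩ := hel
      obtain ⟨k, hel'⟩ : ∃ k : Nat, el = (k : Int) := ⟨el.toNat, by omega⟩
      subst hel'
      beta_reduce
      have hklt : k < l.length := by exact_mod_cast hn
      have hget : PySem.List.pyGetD (l ++ [c]) (k : Int) ' ' = PySem.List.pyGetD l (k : Int) ' ' := by
        rw [PySem.List.pyGetD_natCast, PySem.List.pyGetD_natCast, List.getD_append _ _ _ _ hklt]
      by_cases hk0 : (k : Int) = 0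
      · rw [if_pos hk0, if_pos hk0, hget]
      · rw [if_neg hk0, if_neg hk0]
        have hk1 : (k : Int) - 1 = ((k - 1 : Nat) : Int) := by omega
        have hget1 : PySem.List.pyGetD (l ++ [c]) ((k : Int) - 1) ' ' = PySem.List.pyGetD l ((k : Int) - 1) ' ' := by
          rw [hk1, PySem.List.pyGetD_natCast, PySem.List.pyGetD_natCast,
            List.getD_append _ _ _ _ (by omega)]
        rw [hget, hget1]
    rw [PySem.List.foldl_congr_mem _ _ _ _ hcongr, ih]
    simp only [List.foldl_cons, List.foldl_nil]
    beta_reduce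
    by_cases hnil : l = []
    · subst hnil
      simp [pvCollab, pvGo2, PySem.List.pyGetD, PySem.List.pyGet?, PySem.List.pyIdx?]
    · have hn0 : ((l.length : Int)) ≠ 0 := by
        simp [List.length_eq_zero_iff, hnil]
      rw [if_neg hn0]
      have hgetc : PySem.List.pyGetD (l ++ [c]) (l.length : Int) ' ' = c := by
        rw [PySem.List.pyGetD_natCast, List.getD_append_right _ _ _ _ (le_refl _)]
        simp
      have hgetp : PySem.List.pyGetD (l ++ [c]) ((l.length : Int) - 1) ' ' = l.getLastD ' ' := by
        have h1 : ((l.length : Int)) - 1 = ((l.length - 1 : Nat) : Int) := by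
          have : 1 ≤ l.length := by
            cases l with | nil => exact absurd rfl hnil | cons _ _ => simp
          omega
        rw [h1, PySem.List.pyGetD_natCast, List.getD_append _ _ _ _ (by
          have : 1 ≤ l.length := by
            cases l with | nil => exact absurd rfl hnil | cons _ _ => simp
          omega)]
        exact pvGetD_last l hnil ' '
      rw [hgetc, hgetp, pvCollab_snoc l hnil c]
      have hiff : (c = l.getLastD ' ' ∧ c = '.') ↔ (c = '.' ∧ l.getLastD ' ' = '.') := by
        constructor
        · rintro ⟨h1, h2⟩; exact ⟨h2, h1 ▸ h2⟩
        · rintro ⟨h1, h2⟩; exact ⟨h1.trans h2.symm, h1⟩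
      rw [if_congr hiff rfl rfl]

theorem pvGetLast?_cons (c : Char) (l : List Char) (h : l ≠ []) :
    (c :: l).getLast? = l.getLast? := by
  cases l with
  | nil => simp at h
  | cons x xs => exact List.getLast?_cons_cons ..

theorem pvCanon2_getLast_ne (b : Bool) (l : List Char) :
    (pvCanon2 b l).getLast? ≠ some '.' := by
  induction l generalizing b with
  | nil => simp [pvCanon2]
  | cons c r ih =>
    by_cases hc : c = '.'
    · subst hc
      cases b with
      | false => simpa [pvCanon2] using ih false
      | true =>
        simp only [pvCanon2, if_pos rfl]
        by_cases h0 : pvCanon2 false r = []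
        · simp [h0]
        · simp only [if_neg h0]
          rw [if_pos trivial, pvGetLast?_cons _ _ h0]
          exact ih false
    · cases b <;>
      · simp only [pvCanon2, if_neg hc]
        by_cases h0 : pvCanon2 true r = []
        · simp [h0, hc]
        · rw [pvGetLast?_cons _ _ h0]
          exact ih true

theorem pvCanon2_head_ne (l : List Char) :
    (pvCanon2 false l).head? ≠ some '.' := by
  induction l with
  | nil => simp [pvCanon2]
  | cons c r ih =>
    by_cases hc : c = '.'
    · subst hc; simpa [pvCanon2] using ih
    · simp [pvCanon2, hc]

theorem pvCanon2_chain (b : Bool) (l : List Char) :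
    (pvCanon2 b l).IsChain (fun a c => a ≠ '.' ∨ c ≠ '.') := by
  induction l generalizing b with
  | nil => simp [pvCanon2]
  | cons c r ih =>
    by_cases hc : c = '.'
    · subst hc
      cases b with
      | false => simpa [pvCanon2] using ih false
      | true =>
        simp only [pvCanon2, if_pos rfl]
        by_cases h0 : pvCanon2 false r = []
        · simp [h0]
        · simp only [if_neg h0]
          apply List.IsChain.cons (ih false)
          intro y hy
          right
          intro hy'
          exact pvCanon2_head_ne r (by rw [hy'] at hy; exact hy)
    · cases b <;>
      · simp only [pvCanon2, if_neg hc]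
        apply List.IsChain.cons (ih true)
        intro y _
        left
        exact hc

theorem pvGet_neg_one (x : List Char) (hx : x ≠ []) :
    PySem.List.pyGetD x (-1) ' ' = x.getLastD ' ' := by
  unfold PySem.List.pyGetD PySem.List.pyGet? PySem.List.pyIdx?
  have h1 : 1 ≤ x.length := by cases x with | nil => exact absurd rfl hx | cons _ _ => simp
  rw [if_neg (by omega), if_pos (by omega)]
  have h2 : x.length - (- -1 : Int).toNat = x.length - 1 := by norm_num
  rw [h2]
  simp only [Option.bind_some, List.getLastD_eq_getLast?, List.getLast?_eq_getElem?]

theorem pvPad_eq (x : List Char) (hx : x ≠ []) :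
    pvPadA x = x ++ List.replicate (3 - x.length) (PySem.List.pyGetD x (-1) ' ') := by
  match x, hx with
  | [a], _ =>
    rw [pvPadA, if_pos (by simp), pvPadA, if_pos (by simp), pvPadA]
    rw [pvGet_neg_one [a] (by simp)]
    simp [PySem.List.pyGetD, PySem.List.pyGet?, PySem.List.pyIdx?, List.replicate]
  | [a, b], _ =>
    rw [pvPadA, if_pos (by simp), pvPadA]
    rw [pvGet_neg_one [a, b] (by simp)]
    simp [PySem.List.pyGetD, PySem.List.pyGet?, PySem.List.pyIdx?, List.replicate]
  | a :: b :: c :: t, _ =>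
    rw [pvPadA, if_neg (by simp)]
    have h3 : 3 - (a :: b :: c :: t).length = 0 := by simp
    simp [h3]

theorem pvRstrip_snoc (ys : List Char) (c : Char) :
    pvRstripDots (ys ++ [c]) = if c = '.' then pvRstripDots ys else ys ++ [c] := by
  unfold pvRstripDots
  rw [List.reverse_append]
  simp only [List.reverse_cons, List.reverse_nil, List.nil_append, List.singleton_append,
    List.dropWhile_cons]
  by_cases hc : c = '.'
  · simp [hc]
  · simp [hc]

theorem pvRstrip_of_last_ne (ys : List Char) (h : ys.getLast? ≠ some '.') :
    pvRstripDots ys = ys := by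
  rcases List.eq_nil_or_concat ys with rfl | ⟨zs, c, rfl⟩
  · rfl
  · rw [List.concat_eq_append, pvRstrip_snoc, if_neg]
    intro hc
    exact h (by simp [hc])

theorem pvPad_id (x : List Char) (h : 3 ≤ x.length) : pvPadA x = x := by
  rw [pvPadA, if_neg (by omega)]

-- steps [5]-[7] of A agree with B's [:15].rstrip('.') + ljust on any collapsed, stripped core
theorem pvEndgame (core : List Char) (hne : core ≠ [])
    (hlast : core.getLast? ≠ some '.')
    (hch : core.IsChain (fun a c => a ≠ '.' ∨ c ≠ '.')) :
    pvPadA (if 16 ≤ core.length then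
        (let a := PySem.List.slice core none (some 15)
         if PySem.List.pyGetD a 14 ' ' = '.' then PySem.List.slice a none (some 14) else a)
      else core)
    = (pvRstripDots (PySem.List.slice core none (some 15)) ++
        List.replicate (3 - (pvRstripDots (PySem.List.slice core none (some 15))).length)
          (PySem.List.pyGetD (pvRstripDots (PySem.List.slice core none (some 15))) (-1) ' ')) := by
  have hsl : PySem.List.slice core none (some 15) = core.take 15 := by
    simpa using PySem.List.slice_to core (b := 15) (by norm_num)
  by_cases h16 : 16 ≤ core.length
  · rw [if_pos h16]
    simp only [hsl]
    have h14lt : 14 < core.length := by omega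
    have htake : core.take 15 = core.take 14 ++ [core[14]] := by
      rw [show (15:Nat) = 14 + 1 from rfl, List.take_add_one]
      simp [List.getElem?_eq_getElem h14lt]
    have hget14 : PySem.List.pyGetD (core.take 15) 14 ' ' = core[14] := by
      rw [PySem.List.pyGetD_ofNat', List.getD_eq_getElem?_getD]
      simp [List.getElem?_take, List.getElem?_eq_getElem h14lt]
    have hsl14 : PySem.List.slice (core.take 15) none (some 14) = core.take 14 := by
      have := PySem.List.slice_to (core.take 15) (b := 14) (by norm_num)
      simpa [List.take_take] using this
    have hlen14 : (core.take 14).length = 14 := by simp; omega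
    by_cases hd : core[14] = '.'
    · rw [if_pos (by rw [hget14]; exact hd), hsl14]
      have h13 : core[13]'(by omega) ≠ '.' := by
        have := hch.getElem 13 (by omega)
        rcases this with h | h
        · exact h
        · exact absurd hd h
      have hrs : pvRstripDots (core.take 15) = core.take 14 := by
        rw [htake, pvRstrip_snoc, if_pos hd]
        apply pvRstrip_of_last_ne
        rw [List.getLast?_eq_getElem?, hlen14]
        simp [List.getElem?_take, List.getElem?_eq_getElem (show 13 < core.length by omega)]
        exact h13
      rw [hrs, pvPad_id _ (by rw [hlen14]; omega), show 3 - (core.take 14).length = 0 by rw [hlen14]]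
      simp
    · rw [if_neg (by rw [hget14]; exact hd)]
      have hrs : pvRstripDots (core.take 15) = core.take 15 := by
        rw [htake, pvRstrip_snoc, if_neg hd]
      have hlen15 : (core.take 15).length = 15 := by rw [List.length_take]; omega
      rw [hrs, pvPad_id _ (by rw [hlen15]; omega), show 3 - (core.take 15).length = 0 by rw [hlen15]]
      simp
  · rw [if_neg h16]
    simp only [hsl, List.take_of_length_le (by omega : core.length ≤ 15)]
    rw [pvRstrip_of_last_ne core hlast]
    exact pvPad_eq core hne

-- ===== VERDICT (by name: the statement is the Claim_ definition above) =====
theorem solution_spec : Claim_equal_solution := by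
  intro new_id _
  unfold Spec_solution solution solution_alt
  simp only [pvFold_eq_collab, pvStrip_collab, pvSplitOn_eq, PySem.Chars.join]
  rw [(pvJoin_both ((PySem.Chars.lower new_id.toList).filter
      (fun x => !("~!@#$%^&*()=+[{]}:?,<>/".toList).contains x))).1]
  set cn := pvCanon2 false ((PySem.Chars.lower new_id.toList).filter
      (fun x => !("~!@#$%^&*()=+[{]}:?,<>/".toList).contains x)) with hcn
  have hcore : (if cn = [] then ['a'] else cn) = (if cn.isEmpty then ['a'] else cn) := by
    by_cases h : cn = [] <;> simp [h]
  rw [← hcore]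
  congr 1
  apply pvEndgame
  · by_cases h : cn = [] <;> simp [h]
  · by_cases h : cn = []
    · simp [h]
    · rw [if_neg h, hcn]; exact pvCanon2_getLast_ne false _
  · by_cases h : cn = []
    · simp [h]
    · rw [if_neg h, hcn]; exact pvCanon2_chain false _
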